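-- pv_equiv track=rewrite | github.com/aerobu/padi-ai | apps/api/src/services/question_selection_service.py | should_end_assessment
-- ===== SOURCE A (Python) =====
-- from typing import Dict, List, Optional, Any, Tuple
--
-- def should_end_assessment(
--
--     questions_answered: int,
--     covered_standards: Dict[str, int],
-- ) -> Tuple[bool, Optional[str]]:
--     """
--     Determine if assessment should end.
--
--     Returns:
--         Tuple of (should_end, end_reason)
--     """
--     if questions_answered >= 35:
--         return True, "max_questions_reached"
--
--     # Check domain coverage
--     domain_counts = {}
--     for standard_code in covered_standards.keys():
--         parts = standard_code.split(".")
--         if len(parts) >= 2: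
--             domain = f"{parts[0]}.{parts[1]}"
--             domain_counts[domain] = domain_counts.get(domain, 0) + 1
--
--     # Ensure minimum coverage for key domains
--     min_domains = ["4.NBT", "4.NF", "4.OA", "4.MD", "4.G"]
--     for domain in min_domains:
--         if domain_counts.get(domain, 0) < 3:
--             return False, None
--
--     # All requirements met
--     return True, "all_standards_covered"
-- ===== SOURCE B (Python) =====
-- def should_end_assessment(questions_answered, covered_standards):
--     if questions_answered >= 35:
--         return True, "max_questions_reached"
--     nbt = nf = oa = md = g = 0
--     for s in covered_standards:
--         if s == "4.NBT" or s.startswith("4.NBT."):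
--             nbt += 1
--         elif s == "4.NF" or s.startswith("4.NF."):
--             nf += 1
--         elif s == "4.OA" or s.startswith("4.OA."):
--             oa += 1
--         elif s == "4.MD" or s.startswith("4.MD."):
--             md += 1
--         elif s == "4.G" or s.startswith("4.G."):
--             g += 1
--     if nbt >= 3 and nf >= 3 and oa >= 3 and md >= 3 and g >= 3:
--         return True, "all_standards_covered"
--     return False, None
-- ===== Notes on version B (the rewrite author's own statement) =====
-- stated objective: alternative
-- what changed: B replaces A's split-based domain-counts dict and per-domain early-return loop with a single pass over the keys that classifies each key into one of five scalar counters via an elif chain (the five domain matchers are pairwise exclusive), then one final conjunction check.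
import Mathlib
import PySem

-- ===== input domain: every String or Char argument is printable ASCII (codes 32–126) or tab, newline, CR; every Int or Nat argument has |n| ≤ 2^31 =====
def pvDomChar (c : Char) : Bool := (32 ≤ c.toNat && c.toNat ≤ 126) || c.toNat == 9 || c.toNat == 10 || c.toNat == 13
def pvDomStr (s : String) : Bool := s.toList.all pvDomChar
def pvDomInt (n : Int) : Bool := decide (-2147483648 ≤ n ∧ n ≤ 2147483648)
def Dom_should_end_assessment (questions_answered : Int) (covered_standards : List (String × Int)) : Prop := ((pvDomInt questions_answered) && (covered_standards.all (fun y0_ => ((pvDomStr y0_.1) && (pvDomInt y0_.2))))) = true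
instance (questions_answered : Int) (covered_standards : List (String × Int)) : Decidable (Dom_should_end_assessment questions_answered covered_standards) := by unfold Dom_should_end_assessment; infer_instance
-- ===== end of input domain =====

-- ===== PORT A =====
-- B replaces A's split-based domain-counts dict and per-domain loop with one
-- classifying pass over the keys into five scalar counters (objective: alternative).
def pvMinDomains : List (List Char) :=
  ["4.NBT".toList, "4.NF".toList, "4.OA".toList, "4.MD".toList, "4.G".toList]

-- loop body of A's `for standard_code in covered_standards.keys(): ...`
def pvCountStep (dc : PySem.Dict (List Char) Int) (sc : String) : PySem.Dict (List Char) Int :=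
  let parts := PySem.Chars.splitOn sc.toList ['.']
  if 2 ≤ parts.length then dc.modify (parts[0]! ++ '.' :: parts[1]!) 0 (· + 1) else dc

-- A's `for domain in min_domains: if ... return False, None` with early return
def pvCheckDomains : List (List Char) → PySem.Dict (List Char) Int → Bool × Option String
  | [], _ => (true, some "all_standards_covered")
  | d :: rest, dc => if dc.getD d 0 < 3 then (false, none) else pvCheckDomains rest dc

def should_end_assessment (questions_answered : Int) (covered_standards : List (String × Int)) : Bool × Option String :=
  if 35 ≤ questions_answered then (true, some "max_questions_reached")
  else
    let domain_counts := ((PySem.Dict.ofList covered_standards).keys).foldl pvCountStep PySem.Dict.empty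
    pvCheckDomains pvMinDomains domain_counts

-- ===== PORT B =====
-- B's per-domain test `s == d or s.startswith(d + ".")`
def pvHit (dom s : List Char) : Bool := s == dom || PySem.Chars.startswith s (dom ++ ['.'])

-- B's loop body: the elif chain bumping exactly one of the five counters
def pvTally : (Int × Int × Int × Int × Int) → String → (Int × Int × Int × Int × Int)
  | (nbt, nf, oa, md, g), s =>
      if pvHit "4.NBT".toList s.toList then (nbt + 1, nf, oa, md, g)
      else if pvHit "4.NF".toList s.toList then (nbt, nf + 1, oa, md, g)
      else if pvHit "4.OA".toList s.toList then (nbt, nf, oa + 1, md, g)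
      else if pvHit "4.MD".toList s.toList then (nbt, nf, oa, md + 1, g)
      else if pvHit "4.G".toList s.toList then (nbt, nf, oa, md, g + 1)
      else (nbt, nf, oa, md, g)

def should_end_assessment_alt (questions_answered : Int) (covered_standards : List (String × Int)) : Bool × Option String :=
  if 35 ≤ questions_answered then (true, some "max_questions_reached")
  else
    let t := ((PySem.Dict.ofList covered_standards).keys).foldl pvTally (0, 0, 0, 0, 0)
    if 3 ≤ t.1 ∧ 3 ≤ t.2.1 ∧ 3 ≤ t.2.2.1 ∧ 3 ≤ t.2.2.2.1 ∧ 3 ≤ t.2.2.2.2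
    then (true, some "all_standards_covered")
    else (false, none)

-- ===== PRECONDITION & SPEC =====
def Spec_should_end_assessment (questions_answered : Int) (covered_standards : List (String × Int)) (out : Bool × Option String) : Prop := out = should_end_assessment_alt questions_answered covered_standards
instance (questions_answered : Int) (covered_standards : List (String × Int)) (out : Bool × Option String) : Decidable (Spec_should_end_assessment questions_answered covered_standards out) := by unfold Spec_should_end_assessment; infer_instance

-- ===== CLAIM (what is proved, stated in full; the proofs are below) =====
def Claim_equal_should_end_assessment : Prop := ∀ (questions_answered : Int) (covered_standards : List (String × Int)), Dom_should_end_assessment questions_answered covered_standards → Spec_should_end_assessment questions_answered covered_standards (should_end_assessment questions_answered covered_standards)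

-- ===== LEMMAS AND PROOFS =====

-- A's per-key condition: the key's first two dot-parts exist and join to D
def pvCondA (D : List Char) (s : String) : Bool :=
  let parts := PySem.Chars.splitOn s.toList ['.']
  decide (2 ≤ parts.length) && (parts[0]! ++ '.' :: parts[1]! == D)

theorem pv_go (fuel : Nat) : ∀ (l cur : List Char) (acc : List (List Char)), l.length < fuel →
    PySem.Chars.splitOn.go ['.'] fuel l cur acc
      = acc.reverse ++ (List.splitOnP (· == '.') l).modifyHead (cur.reverse ++ ·) := by
  induction fuel with
  | zero => intro l cur acc h; omega
  | succ f ih =>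
    intro l cur acc h
    cases l with
    | nil => simp [PySem.Chars.splitOn.go, List.splitOnP_nil]
    | cons c rest =>
      obtain ⟨h0, t, hsplit⟩ : ∃ h0 t, List.splitOnP (· == '.') rest = h0 :: t := by
        cases hx : List.splitOnP (· == '.') rest with
        | nil => exact absurd hx (List.splitOnP_ne_nil _ _)
        | cons a b => exact ⟨a, b, rfl⟩
      by_cases hc : c = '.'
      · subst hc
        rw [show PySem.Chars.splitOn.go ['.'] (f+1) ('.'::rest) cur acc = PySem.Chars.splitOn.go ['.'] f rest [] (cur.reverse :: acc) from by simp [PySem.Chars.splitOn.go, List.isPrefixOf]]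
        rw [ih rest [] _ (by simpa using h)]
        simp [List.splitOnP_cons, hsplit]
      · rw [show PySem.Chars.splitOn.go ['.'] (f+1) (c::rest) cur acc = PySem.Chars.splitOn.go ['.'] f rest (c :: cur) acc from by simp [PySem.Chars.splitOn.go, List.isPrefixOf, Ne.symm hc]]
        rw [ih rest _ _ (by simpa using h)]
        simp [List.splitOnP_cons, hsplit, hc]

theorem pv_splitOn_eq_splitOnP (cs : List Char) :
    PySem.Chars.splitOn cs ['.'] = List.splitOnP (· == '.') cs := by
  rw [PySem.Chars.splitOn, pv_go _ _ _ _ (by omega)]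
  cases hx : List.splitOnP (· == '.') cs with
  | nil => exact absurd hx (List.splitOnP_ne_nil _ _)
  | cons a b => simp

theorem pv_head_peel (d0 : List Char) (h0 : '.' ∉ d0) : ∀ (cs : List Char) (rest : List (List Char)),
    List.splitOnP (· == '.') cs = d0 :: rest ↔
      (cs = d0 ∧ rest = []) ∨ ∃ r, cs = d0 ++ '.' :: r ∧ rest = List.splitOnP (· == '.') r := by
  induction d0 with
  | nil =>
    intro cs rest
    cases cs with
    | nil => simp [List.splitOnP_nil]
    | cons c cs' =>
      by_cases hc : c = '.'
      · subst hc; simp [List.splitOnP_cons, eq_comm]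
      · obtain ⟨h1, t, hsplit⟩ : ∃ h1 t, List.splitOnP (· == '.') cs' = h1 :: t := by
          cases hx : List.splitOnP (· == '.') cs' with
          | nil => exact absurd hx (List.splitOnP_ne_nil _ _)
          | cons a b => exact ⟨a, b, rfl⟩
        simp [List.splitOnP_cons, hc, hsplit]
  | cons a d0' ih =>
    have ha : a ≠ '.' := fun h => h0 (by simp [h])
    have h0' : '.' ∉ d0' := fun h => h0 (List.mem_cons_of_mem _ h)
    intro cs rest
    cases cs with
    | nil => simp [List.splitOnP_nil]
    | cons c cs' =>
      by_cases hc : c = '.'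
      · subst hc; simp [List.splitOnP_cons, Ne.symm ha]
      · obtain ⟨h1, t, hsplit⟩ : ∃ h1 t, List.splitOnP (· == '.') cs' = h1 :: t := by
          cases hx : List.splitOnP (· == '.') cs' with
          | nil => exact absurd hx (List.splitOnP_ne_nil _ _)
          | cons a b => exact ⟨a, b, rfl⟩
        have hl : List.splitOnP (· == '.') (c :: cs') = (c :: h1) :: t := by
          simp [List.splitOnP_cons, hc, hsplit]
        rw [hl]
        have hiff : List.splitOnP (· == '.') cs' = d0' :: rest ↔ (h1 = d0' ∧ t = rest) := by
          simp [hsplit]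
        constructor
        · rintro h
          rw [List.cons.injEq, List.cons.injEq] at h
          obtain ⟨⟨hca, hhd⟩, ht⟩ := h
          have := (ih h0' cs' rest).mp (hiff.mpr ⟨hhd, ht⟩)
          rcases this with ⟨hcs, hr⟩ | ⟨r, hcs, hr⟩
          · exact Or.inl ⟨by simp [hca, hcs], hr⟩
          · exact Or.inr ⟨r, by simp [hca, hcs], hr⟩
        · rintro (⟨hcs, hr⟩ | ⟨r, hcs, hr⟩)
          · rw [List.cons.injEq] at hcs
            obtain ⟨hca, hcs'⟩ := hcs
            have := hiff.mp ((ih h0' cs' rest).mpr (Or.inl ⟨hcs', hr⟩))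
            simp [hca, this.1, this.2]
          · rw [List.cons_append, List.cons.injEq] at hcs
            obtain ⟨hca, hcs'⟩ := hcs
            have := hiff.mp ((ih h0' cs' rest).mpr (Or.inr ⟨r, hcs', hr⟩))
            simp [hca, this.1, this.2]

theorem pv_first_piece_dotfree (cs : List Char) : ∀ (X : List Char) (t : List (List Char)),
    List.splitOnP (· == '.') cs = X :: t → '.' ∉ X := by
  induction cs with
  | nil =>
    intro X t h
    rw [List.splitOnP_nil] at h
    injection h with h1 h2
    rw [← h1]; simp
  | cons c cs' ih =>
    intro X t h
    by_cases hc : c = '.'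
    · subst hc
      rw [List.splitOnP_cons, if_pos (by simp)] at h
      injection h with h1 h2
      rw [← h1]; simp
    · obtain ⟨h1, t', hsplit⟩ : ∃ h1 t', List.splitOnP (· == '.') cs' = h1 :: t' := by
        cases hx : List.splitOnP (· == '.') cs' with
        | nil => exact absurd hx (List.splitOnP_ne_nil _ _)
        | cons a b => exact ⟨a, b, rfl⟩
      rw [List.splitOnP_cons, if_neg (by simp [hc]), hsplit] at h
      simp only [List.modifyHead, List.cons.injEq] at h
      obtain ⟨hX, -⟩ := h
      intro hmem
      rw [← hX] at hmem
      rcases List.mem_cons.mp hmem with h' | h'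
      · exact hc h'.symm
      · exact ih h1 t' hsplit h'

theorem pv_first_dot_unique (X : List Char) : ∀ (d0 Y d1 : List Char), '.' ∉ X → '.' ∉ d0 →
    X ++ '.' :: Y = d0 ++ '.' :: d1 → X = d0 ∧ Y = d1 := by
  induction X with
  | nil =>
    intro d0 Y d1 _ h0 h
    cases d0 with
    | nil => simpa using h
    | cons a d0' => simp at h; exact absurd (by simp [← h.1]) h0
  | cons x X' ih =>
    intro d0 Y d1 hX h0 h
    cases d0 with
    | nil => simp at h; exact absurd (by simp [h.1]) hX
    | cons a d0' =>
      simp only [List.cons_append, List.cons.injEq] at h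
      have := ih d0' Y d1 (fun m => hX (List.mem_cons_of_mem _ m)) (fun m => h0 (List.mem_cons_of_mem _ m)) h.2
      exact ⟨by simp [h.1, this.1], this.2⟩

theorem pv_two_level (d0 d1 : List Char) (h0 : '.' ∉ d0) (h1 : '.' ∉ d1) (cs : List Char) :
    (∃ t, List.splitOnP (· == '.') cs = d0 :: d1 :: t) ↔
      (cs = d0 ++ '.' :: d1 ∨ ∃ r, cs = (d0 ++ '.' :: d1) ++ '.' :: r) := by
  constructor
  · rintro ⟨t, h⟩
    rcases (pv_head_peel d0 h0 cs (d1 :: t)).mp h with ⟨-, habs⟩ | ⟨r, hcs, hr⟩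
    · cases habs
    · rcases (pv_head_peel d1 h1 r t).mp hr.symm with ⟨hreq, -⟩ | ⟨r', hreq, -⟩
      · left; rw [hcs, hreq]
      · right; exact ⟨r', by rw [hcs, hreq]; simp⟩
  · rintro (h | ⟨r, h⟩)
    · refine ⟨[], (pv_head_peel d0 h0 _ _).mpr (Or.inr ⟨d1, h, ?_⟩)⟩
      exact ((pv_head_peel d1 h1 d1 []).mpr (Or.inl ⟨rfl, rfl⟩)).symm
    · refine ⟨List.splitOnP (· == '.') r, (pv_head_peel d0 h0 _ _).mpr (Or.inr ⟨d1 ++ '.' :: r, by simpa using h, ?_⟩)⟩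
      exact ((pv_head_peel d1 h1 _ _).mpr (Or.inr ⟨r, rfl, rfl⟩)).symm

theorem pv_hit_iff (D : List Char) (cs : List Char) :
    pvHit D cs = true ↔ (cs = D ∨ ∃ r, cs = D ++ '.' :: r) := by
  rw [pvHit, Bool.or_eq_true, beq_iff_eq, PySem.Chars.startswith_iff]
  constructor
  · rintro (h | ⟨u, hu⟩)
    · exact Or.inl h
    · exact Or.inr ⟨u, by rw [← hu]; simp⟩
  · rintro (h | ⟨r, hr⟩)
    · exact Or.inl h
    · exact Or.inr ⟨r, by rw [hr]; simp⟩

theorem pv_condA_eq_hit (d0 d1 : List Char) (h0 : '.' ∉ d0) (h1 : '.' ∉ d1) (s : String) :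
    pvCondA (d0 ++ '.' :: d1) s = pvHit (d0 ++ '.' :: d1) s.toList := by
  rw [Bool.eq_iff_iff, pv_hit_iff, ← pv_two_level d0 d1 h0 h1]
  rw [pvCondA]
  simp only [pv_splitOn_eq_splitOnP, Bool.and_eq_true, decide_eq_true_eq, beq_iff_eq]
  cases hx : List.splitOnP (· == '.') s.toList with
  | nil => exact absurd hx (List.splitOnP_ne_nil _ _)
  | cons X t0 =>
    cases t0 with
    | nil =>
      constructor
      · rintro ⟨hlen, -⟩; simp at hlen
      · rintro ⟨t, ht⟩; cases ht
    | cons Y t =>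
      have hXf : '.' ∉ X := pv_first_piece_dotfree s.toList X _ hx
      constructor
      · rintro ⟨-, hj⟩
        simp only [List.getElem!_cons_zero, List.getElem!_cons_succ] at hj
        obtain ⟨hX, hY⟩ := pv_first_dot_unique X d0 Y d1 hXf h0 hj
        exact ⟨t, by rw [hX, hY]⟩
      · rintro ⟨t', ht'⟩
        injection ht' with e1 rest
        injection rest with e2 e3
        refine ⟨by simp, ?_⟩
        simp [e1, e2]

theorem pv_step_getD (D : List Char) (dct : PySem.Dict (List Char) Int) (s : String) :
    (pvCountStep dct s).getD D 0 = dct.getD D 0 + (if pvCondA D s then 1 else 0) := by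
  rw [pvCountStep, pvCondA]
  by_cases hlen : 2 ≤ (PySem.Chars.splitOn s.toList ['.']).length
  · simp only [hlen, if_pos, decide_true, Bool.true_and]
    by_cases hk : (PySem.Chars.splitOn s.toList ['.'])[0]! ++ '.' :: (PySem.Chars.splitOn s.toList ['.'])[1]! = D
    · rw [hk, PySem.Dict.getD_modify_self]; simp
    · rw [PySem.Dict.getD_modify_of_ne _ _ _ (Ne.symm hk)]
      have hb : ((PySem.Chars.splitOn s.toList ['.'])[0]! ++ '.' :: (PySem.Chars.splitOn s.toList ['.'])[1]! == D) = false := by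
        simpa using hk
      rw [hb]
      simp
  · simp [hlen]

theorem pv_fold_count (D : List Char) (K : List String) : ∀ (dct : PySem.Dict (List Char) Int),
    (K.foldl pvCountStep dct).getD D 0 = dct.getD D 0 + (K.countP (pvCondA D) : Int) := by
  induction K with
  | nil => simp
  | cons s K ih =>
    intro dct
    rw [List.foldl_cons, ih, pv_step_getD, List.countP_cons]
    push_cast
    by_cases hp : pvCondA D s <;> simp [hp]; ring

theorem pv_counts (cs : List (String × Int)) :
    ∀ d ∈ pvMinDomains,
      ((((PySem.Dict.ofList cs).keys).foldl pvCountStep PySem.Dict.empty)).getD d 0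
        = ((((PySem.Dict.ofList cs).keys)).countP (fun s => pvHit d s.toList) : Int) := by
  have key : ∀ (d0 d1 : List Char), '.' ∉ d0 → '.' ∉ d1 →
      ((((PySem.Dict.ofList cs).keys).foldl pvCountStep PySem.Dict.empty)).getD (d0 ++ '.' :: d1) 0
        = ((((PySem.Dict.ofList cs).keys)).countP (fun s => pvHit (d0 ++ '.' :: d1) s.toList) : Int) := by
    intro d0 d1 h0 h1
    rw [pv_fold_count]
    rw [List.countP_congr (fun s _ => by rw [pv_condA_eq_hit d0 d1 h0 h1 s])]
    have hempty : (PySem.Dict.empty : PySem.Dict (List Char) Int).getD (d0 ++ '.' :: d1) 0 = 0 := rfl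
    rw [hempty]; ring
  intro d hd
  rw [pvMinDomains] at hd
  simp only [List.mem_cons, List.not_mem_nil, or_false] at hd
  rcases hd with rfl | rfl | rfl | rfl | rfl
  · rw [show ("4.NBT".toList : List Char) = "4".toList ++ '.' :: "NBT".toList from by decide]
    exact key _ _ (by decide) (by decide)
  · rw [show ("4.NF".toList : List Char) = "4".toList ++ '.' :: "NF".toList from by decide]
    exact key _ _ (by decide) (by decide)
  · rw [show ("4.OA".toList : List Char) = "4".toList ++ '.' :: "OA".toList from by decide]
    exact key _ _ (by decide) (by decide)
  · rw [show ("4.MD".toList : List Char) = "4".toList ++ '.' :: "MD".toList from by decide]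
    exact key _ _ (by decide) (by decide)
  · rw [show ("4.G".toList : List Char) = "4".toList ++ '.' :: "G".toList from by decide]
    exact key _ _ (by decide) (by decide)

-- B-side: if a key hits a domain, its first |d| characters are that domain
theorem pv_hit_take (d cs : List Char) (h : pvHit d cs = true) : cs.take d.length = d := by
  rcases (pv_hit_iff d cs).mp h with h | ⟨r, h⟩
  · rw [h, List.take_length]
  · rw [h, List.take_append_of_le_length (le_refl _), List.take_length]

-- the five domain matchers are pairwise exclusive
theorem pv_hit_disjoint (d1 d2 cs : List Char) (h12 : d2.take d1.length ≠ d1)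
    (h21 : d1.take d2.length ≠ d2) (h1 : pvHit d1 cs = true) : pvHit d2 cs = false := by
  cases hx : pvHit d2 cs with
  | false => rfl
  | true =>
    have t1 := pv_hit_take d1 cs h1
    have t2 := pv_hit_take d2 cs hx
    rcases le_total d1.length d2.length with hle | hle
    · exact absurd (by rw [← t2, List.take_take, min_eq_left hle, t1]) h12
    · exact absurd (by rw [← t1, List.take_take, min_eq_left hle, t2]) h21

-- B's elif chain bumps the unique matching counter
theorem pv_tally_step (a b c d e : Int) (s : String) :
    pvTally (a, b, c, d, e) s =
      (a + (if pvHit "4.NBT".toList s.toList then 1 else 0),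
       b + (if pvHit "4.NF".toList s.toList then 1 else 0),
       c + (if pvHit "4.OA".toList s.toList then 1 else 0),
       d + (if pvHit "4.MD".toList s.toList then 1 else 0),
       e + (if pvHit "4.G".toList s.toList then 1 else 0)) := by
  rw [pvTally]
  by_cases h1 : pvHit ['4', '.', 'N', 'B', 'T'] s.toList = true
  · simp [h1, pv_hit_disjoint ['4', '.', 'N', 'B', 'T'] ['4', '.', 'N', 'F'] _ (by decide) (by decide) h1,
      pv_hit_disjoint ['4', '.', 'N', 'B', 'T'] ['4', '.', 'O', 'A'] _ (by decide) (by decide) h1,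
      pv_hit_disjoint ['4', '.', 'N', 'B', 'T'] ['4', '.', 'M', 'D'] _ (by decide) (by decide) h1,
      pv_hit_disjoint ['4', '.', 'N', 'B', 'T'] ['4', '.', 'G'] _ (by decide) (by decide) h1]
  · by_cases h2 : pvHit ['4', '.', 'N', 'F'] s.toList = true
    · simp [h1, h2, pv_hit_disjoint ['4', '.', 'N', 'F'] ['4', '.', 'O', 'A'] _ (by decide) (by decide) h2,
        pv_hit_disjoint ['4', '.', 'N', 'F'] ['4', '.', 'M', 'D'] _ (by decide) (by decide) h2,
        pv_hit_disjoint ['4', '.', 'N', 'F'] ['4', '.', 'G'] _ (by decide) (by decide) h2]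
    · by_cases h3 : pvHit ['4', '.', 'O', 'A'] s.toList = true
      · simp [h1, h2, h3, pv_hit_disjoint ['4', '.', 'O', 'A'] ['4', '.', 'M', 'D'] _ (by decide) (by decide) h3,
          pv_hit_disjoint ['4', '.', 'O', 'A'] ['4', '.', 'G'] _ (by decide) (by decide) h3]
      · by_cases h4 : pvHit ['4', '.', 'M', 'D'] s.toList = true
        · simp [h1, h2, h3, h4, pv_hit_disjoint ['4', '.', 'M', 'D'] ['4', '.', 'G'] _ (by decide) (by decide) h4]
        · by_cases h5 : pvHit ['4', '.', 'G'] s.toList = true <;> simp [h1, h2, h3, h4, h5]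

theorem pv_fold_tally (K : List String) : ∀ (a b c d e : Int),
    K.foldl pvTally (a, b, c, d, e) =
      (a + (K.countP (fun s => pvHit "4.NBT".toList s.toList) : Int),
       b + (K.countP (fun s => pvHit "4.NF".toList s.toList) : Int),
       c + (K.countP (fun s => pvHit "4.OA".toList s.toList) : Int),
       d + (K.countP (fun s => pvHit "4.MD".toList s.toList) : Int),
       e + (K.countP (fun s => pvHit "4.G".toList s.toList) : Int)) := by
  induction K with
  | nil => simp
  | cons s K ih =>
    intro a b c d e
    rw [List.foldl_cons, pv_tally_step, ih]
    simp only [List.countP_cons, Prod.mk.injEq]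
    by_cases h1 : pvHit ['4', '.', 'N', 'B', 'T'] s.toList = true <;>
    by_cases h2 : pvHit ['4', '.', 'N', 'F'] s.toList = true <;>
    by_cases h3 : pvHit ['4', '.', 'O', 'A'] s.toList = true <;>
    by_cases h4 : pvHit ['4', '.', 'M', 'D'] s.toList = true <;>
    by_cases h5 : pvHit ['4', '.', 'G'] s.toList = true <;>
      (simp [h1, h2, h3, h4, h5] <;> push_cast <;> omega)

-- ===== VERDICT (by name: the statement is the Claim_ definition above) =====
theorem should_end_assessment_spec : Claim_equal_should_end_assessment := by
  intro qa cs _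
  unfold Spec_should_end_assessment should_end_assessment should_end_assessment_alt
  by_cases hq : 35 ≤ qa
  · simp [hq]
  · simp only [if_neg hq]
    have hc := pv_counts cs
    simp only [pvMinDomains, List.mem_cons, List.not_mem_nil, or_false, forall_eq_or_imp,
      forall_eq] at hc
    obtain ⟨c1, c2, c3, c4, c5⟩ := hc
    show pvCheckDomains pvMinDomains _ = _
    simp only [pvMinDomains, pvCheckDomains, c1, c2, c3, c4, c5, pv_fold_tally, zero_add]
    split_ifs <;> first | rfl | omega
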